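-- pv_equiv track=rewrite | github.com/KarthickJShankar/PythonCodes | Everyday COding/string Manupulation retest.py | solution
-- ===== SOURCE A (Python) =====
-- def solution(st):
--     new_list = []
--     for n in st:
--         if n not in new_list:
--             new_list.append(n)
--         elif n in new_list:
--             new_list.remove(n)
--             new_list.append(n)
--     return ''.join(new_list)
-- ===== SOURCE B (Python) =====
-- def solution(st):
--     # Last-occurrence order is the reverse of the first-occurrence dedup of the
--     # reversed string: dict.fromkeys keeps first occurrences in order, O(n) total.
--     return ''.join(reversed(dict.fromkeys(reversed(st))))
-- ===== Notes on version B (the rewrite author's own statement) =====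
-- stated objective: faster
-- what changed: Replaces the quadratic move-to-back list loop (membership test + remove per char) with a single hashed dedup: reverse the string, dict.fromkeys for first occurrences, reverse back.
import Mathlib
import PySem

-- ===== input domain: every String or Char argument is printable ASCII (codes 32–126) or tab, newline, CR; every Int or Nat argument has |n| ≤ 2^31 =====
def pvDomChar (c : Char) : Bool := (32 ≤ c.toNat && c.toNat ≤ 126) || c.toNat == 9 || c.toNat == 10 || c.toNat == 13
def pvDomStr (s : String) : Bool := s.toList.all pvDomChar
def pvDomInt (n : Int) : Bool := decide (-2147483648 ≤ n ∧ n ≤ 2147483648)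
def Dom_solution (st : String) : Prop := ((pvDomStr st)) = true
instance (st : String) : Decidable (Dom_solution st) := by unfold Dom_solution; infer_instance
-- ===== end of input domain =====

-- B replaces A's quadratic move-to-back list loop with reverse → first-occurrence dedup → reverse.

-- ===== PORT A =====
-- one iteration of A's for-loop body over the accumulator new_list
def solutionStep (new_list : List Char) (n : Char) : List Char :=
  if n ∉ new_list then new_list ++ [n]
  else if n ∈ new_list then
    match PySem.List.remove? new_list n with
    | some l => l ++ [n]
    | none => new_list   -- unreachable: this branch is guarded by n ∈ new_list
  else new_list

def solution (st : String) : String :=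
  String.ofList (st.toList.foldl solutionStep [])

-- ===== PORT B =====
def solution_alt (st : String) : String :=
  String.ofList ((PySem.List.dedup st.toList.reverse).reverse)

-- ===== PRECONDITION & SPEC =====
def Spec_solution (st : String) (out : String) : Prop := out = solution_alt st
instance (st : String) (out : String) : Decidable (Spec_solution st out) := by unfold Spec_solution; infer_instance

-- ===== CLAIM (what is proved, stated in full; the proofs are below) =====
def Claim_equal_solution : Prop := ∀ (st : String), Dom_solution st → Spec_solution st (solution st)

-- ===== LEMMAS AND PROOFS =====

-- structural form of first-occurrence dedup, used only in the proofs
def fdd : List Char → List Char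
  | [] => []
  | x :: xs => x :: (fdd xs).filter (fun y => !(y == x))

theorem foldl_add_eq_append_filter (xs s : List Char) (hs : s.Nodup) :
    xs.foldl PySem.Set.add s = s ++ (fdd xs).filter (fun y => !(s.contains y)) := by
  induction xs generalizing s with
  | nil => simp [fdd]
  | cons x xs ih =>
    simp only [List.foldl_cons, fdd]
    by_cases hx : x ∈ s
    · have hadd : PySem.Set.add s x = s := by
        simp [PySem.Set.add, List.contains_eq_mem, hx]
      rw [hadd, ih s hs]
      congr 1
      rw [List.filter_cons]
      simp only [List.contains_eq_mem, hx, decide_true, Bool.not_true, Bool.false_eq_true,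
        if_false, List.filter_filter]
      apply List.filter_congr
      intro y _
      by_cases hyx : y = x
      · subst hyx; simp [hx]
      · simp [hyx]
    · have hadd : PySem.Set.add s x = s ++ [x] := by
        simp [PySem.Set.add, List.contains_eq_mem, hx]
      have hs' : (s ++ [x]).Nodup := by
        rw [List.nodup_append]
        exact ⟨hs, List.nodup_singleton x, fun a ha b hb => (List.mem_singleton.mp hb) ▸ fun h => hx (h ▸ ha)⟩
      rw [hadd, ih _ hs', List.filter_cons]
      simp only [List.contains_eq_mem, hx, decide_false, Bool.not_false, if_true,
        List.append_assoc, List.singleton_append, List.filter_filter]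
      congr 2
      apply List.filter_congr
      intro y _
      by_cases hyx : y = x
      · subst hyx; simp [hx]
      · by_cases hys : y ∈ s <;> simp [hyx, hys]

theorem ofList_eq_fdd (xs : List Char) : PySem.Set.ofList xs = fdd xs := by
  have h := foldl_add_eq_append_filter xs [] List.nodup_nil
  simpa [PySem.Set.ofList, PySem.Set.empty] using h

theorem fdd_nodup (xs : List Char) : (fdd xs).Nodup := by
  rw [← ofList_eq_fdd]; exact PySem.Set.nodup_ofList xs

theorem foldl_step_eq (l : List Char) :
    l.foldl solutionStep [] = (fdd l.reverse).reverse := by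
  induction l using List.reverseRecOn with
  | nil => simp [fdd]
  | append_singleton l n ih =>
    rw [List.foldl_append, List.foldl_cons, List.foldl_nil, ih,
      List.reverse_append, List.reverse_singleton, List.singleton_append]
    show solutionStep (fdd l.reverse).reverse n = (fdd (n :: l.reverse)).reverse
    have hnd : ((fdd l.reverse).reverse).Nodup := by
      simpa using fdd_nodup l.reverse
    simp only [fdd, List.reverse_cons]
    by_cases hn : n ∈ (fdd l.reverse).reverse
    · have hrm := PySem.List.remove?_eq_some_erase ((fdd l.reverse).reverse) n hn
      simp only [solutionStep, hn, not_true, if_false, if_true, hrm]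
      have herase : ((fdd l.reverse).reverse).erase n
          = ((fdd l.reverse).reverse).filter (fun y => !(y == n)) := by
        rw [List.Nodup.erase_eq_filter hnd]
        simp [bne]
      rw [herase, List.filter_reverse]
    · simp only [solutionStep, hn, not_false_iff, if_true]
      have hfix : (fdd l.reverse).filter (fun y => !(y == n)) = fdd l.reverse := by
        apply List.filter_eq_self.mpr
        intro y hy
        have : y ≠ n := by
          intro h; subst h
          exact hn (by simpa using hy)
        simp [this]
      rw [hfix]

-- ===== VERDICT (by name: the statement is the Claim_ definition above) =====
theorem solution_spec : Claim_equal_solution := by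
  intro st _
  unfold Spec_solution solution solution_alt
  rw [foldl_step_eq, PySem.List.dedup, ofList_eq_fdd]
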